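-- pv_equiv track=rewrite | github.com/Vedika1102/AI-Methods-in-Adversarial-Search | part1/raichu.py | whether_win_ornot
-- ===== SOURCE A (Python) =====
-- def whether_win_ornot(board):
--     # Initialize sets for the two players
--     white_player = set()
--     black_player = set()
--     # Define symbols for pieces
--     wh, bl = ['w', 'W', '@'], ['b', 'B', '$']
--
--     row_index = 0
--     while row_index < len(board):
--         col_index = 0
--         while col_index < len(board[row_index]):
--             each_col = board[row_index][col_index]
--             # Adding pieces to the respective sets
--             if each_col in bl:
--                 black_player.add(each_col)
--             elif each_col in wh:
--                 white_player.add(each_col)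
--             col_index += 1
--         row_index += 1
--
--     # Check if a player has won
--     if len(black_player) == 0 or len(white_player) == 0:
--         return True
--     return False
-- ===== SOURCE B (Python) =====
-- def whether_win_ornot(board):
--     # Two short-circuiting existence passes instead of populating piece sets.
--     has_white = any(c in ('w', 'W', '@') for row in board for c in row)
--     has_black = any(c in ('b', 'B', '$') for row in board for c in row)
--     return not (has_white and has_black)
-- ===== Notes on version B (the rewrite author's own statement) =====
-- stated objective: simpler
-- what changed: Replaces the index-driven double while-loop that populates two piece sets and then tests their sizes with two short-circuiting any() existence passes combined by not (has_white and has_black).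
import Mathlib
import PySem

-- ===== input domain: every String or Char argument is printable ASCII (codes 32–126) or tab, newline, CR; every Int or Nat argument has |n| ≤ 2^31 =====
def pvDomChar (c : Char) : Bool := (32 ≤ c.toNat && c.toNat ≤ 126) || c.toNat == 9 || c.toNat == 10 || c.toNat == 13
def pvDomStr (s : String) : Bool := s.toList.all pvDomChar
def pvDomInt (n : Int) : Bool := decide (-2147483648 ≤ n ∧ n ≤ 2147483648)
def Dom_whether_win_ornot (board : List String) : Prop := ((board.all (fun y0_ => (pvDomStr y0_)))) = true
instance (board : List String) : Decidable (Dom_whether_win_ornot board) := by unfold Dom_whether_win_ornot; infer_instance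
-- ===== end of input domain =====

-- B replaces the two index-driven while-loops populating piece sets with two any() existence passes (simpler).

-- ===== PORT A =====
-- one step of A's inner while loop: classify a cell into the (white, black) piece sets
def pvStepA (st : PySem.Set Char × PySem.Set Char) (c : Char) :
    PySem.Set Char × PySem.Set Char :=
  if c ∈ (['b', 'B', '$'] : List Char) then (st.1, PySem.Set.add st.2 c)
  else if c ∈ (['w', 'W', '@'] : List Char) then (PySem.Set.add st.1 c, st.2)
  else st

def whether_win_ornot (board : List String) : Bool :=
  let st := board.foldl (fun st row => row.toList.foldl pvStepA st)
      ((PySem.Set.empty : PySem.Set Char), (PySem.Set.empty : PySem.Set Char))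
  if PySem.Set.len st.2 = 0 ∨ PySem.Set.len st.1 = 0 then true else false

-- ===== PORT B =====
def whether_win_ornot_alt (board : List String) : Bool :=
  let has_white := board.any (fun row => row.toList.any (fun c => c ∈ (['w', 'W', '@'] : List Char)))
  let has_black := board.any (fun row => row.toList.any (fun c => c ∈ (['b', 'B', '$'] : List Char)))
  !(has_white && has_black)

-- ===== PRECONDITION & SPEC =====
def Spec_whether_win_ornot (board : List String) (out : Bool) : Prop := out = whether_win_ornot_alt board
instance (board : List String) (out : Bool) : Decidable (Spec_whether_win_ornot board out) := by unfold Spec_whether_win_ornot; infer_instance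

-- ===== CLAIM (what is proved, stated in full; the proofs are below) =====
def Claim_equal_whether_win_ornot : Prop := ∀ (board : List String), Dom_whether_win_ornot board → Spec_whether_win_ornot board (whether_win_ornot board)

-- ===== LEMMAS AND PROOFS =====

theorem pv_add_ne_nil (s : PySem.Set Char) (c : Char) : PySem.Set.add s c ≠ [] := by
  unfold PySem.Set.add
  split
  · rename_i h
    intro hnil
    subst hnil
    simp [PySem.Set.contains] at h
  · simp

theorem pv_forall_cons_drop {α : Type} {P : α → Prop} {c : α} {cs : List α} (hc : P c) :
    (∀ x ∈ c :: cs, P x) ↔ (∀ x ∈ cs, P x) := by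
  simp [hc]

theorem pv_fold_black_empty (cs : List Char) (st : PySem.Set Char × PySem.Set Char) :
    ((cs.foldl pvStepA st).2 = [] ↔
      st.2 = [] ∧ ∀ c ∈ cs, c ∉ (['b', 'B', '$'] : List Char)) := by
  induction cs generalizing st with
  | nil => simp
  | cons c cs ih =>
    rw [List.foldl_cons]
    by_cases hb : c ∈ (['b', 'B', '$'] : List Char)
    · rw [show pvStepA st c = (st.1, PySem.Set.add st.2 c) from by simp [pvStepA, hb], ih]
      constructor
      · rintro ⟨h, -⟩; exact absurd h (pv_add_ne_nil _ _)
      · rintro ⟨-, h⟩; exact absurd hb (h c (List.mem_cons_self))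
    · by_cases hw : c ∈ (['w', 'W', '@'] : List Char)
      · rw [show pvStepA st c = (PySem.Set.add st.1 c, st.2) from by simp [pvStepA, hb, hw], ih,
          pv_forall_cons_drop (P := fun x => x ∉ (['b', 'B', '$'] : List Char)) hb]
      · rw [show pvStepA st c = st from by simp [pvStepA, hb, hw], ih,
          pv_forall_cons_drop (P := fun x => x ∉ (['b', 'B', '$'] : List Char)) hb]

theorem pv_fold_white_empty (cs : List Char) (st : PySem.Set Char × PySem.Set Char) :
    ((cs.foldl pvStepA st).1 = [] ↔
      st.1 = [] ∧ ∀ c ∈ cs, c ∉ (['w', 'W', '@'] : List Char)) := by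
  induction cs generalizing st with
  | nil => simp
  | cons c cs ih =>
    rw [List.foldl_cons]
    by_cases hb : c ∈ (['b', 'B', '$'] : List Char)
    · have hw : c ∉ (['w', 'W', '@'] : List Char) := by fin_cases hb <;> decide
      rw [show pvStepA st c = (st.1, PySem.Set.add st.2 c) from by simp [pvStepA, hb], ih,
        pv_forall_cons_drop (P := fun x => x ∉ (['w', 'W', '@'] : List Char)) hw]
    · by_cases hw : c ∈ (['w', 'W', '@'] : List Char)
      · rw [show pvStepA st c = (PySem.Set.add st.1 c, st.2) from by simp [pvStepA, hb, hw], ih]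
        constructor
        · rintro ⟨h, -⟩; exact absurd h (pv_add_ne_nil _ _)
        · rintro ⟨-, h⟩; exact absurd hw (h c (List.mem_cons_self))
      · rw [show pvStepA st c = st from by simp [pvStepA, hb, hw], ih,
          pv_forall_cons_drop (P := fun x => x ∉ (['w', 'W', '@'] : List Char)) hw]

theorem pv_rows_black_empty (rows : List String) (st : PySem.Set Char × PySem.Set Char) :
    ((rows.foldl (fun st row => row.toList.foldl pvStepA st) st).2 = [] ↔
      st.2 = [] ∧ ∀ r ∈ rows, ∀ c ∈ r.toList, c ∉ (['b', 'B', '$'] : List Char)) := by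
  induction rows generalizing st with
  | nil => simp
  | cons r rows ih =>
    rw [List.foldl_cons, ih, pv_fold_black_empty]
    simp only [List.forall_mem_cons]
    tauto

theorem pv_rows_white_empty (rows : List String) (st : PySem.Set Char × PySem.Set Char) :
    ((rows.foldl (fun st row => row.toList.foldl pvStepA st) st).1 = [] ↔
      st.1 = [] ∧ ∀ r ∈ rows, ∀ c ∈ r.toList, c ∉ (['w', 'W', '@'] : List Char)) := by
  induction rows generalizing st with
  | nil => simp
  | cons r rows ih =>
    rw [List.foldl_cons, ih, pv_fold_white_empty]
    simp only [List.forall_mem_cons]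
    tauto

-- ===== VERDICT (by name: the statement is the Claim_ definition above) =====
theorem whether_win_ornot_spec : Claim_equal_whether_win_ornot := by
  intro board _
  unfold Spec_whether_win_ornot whether_win_ornot whether_win_ornot_alt
  simp only [PySem.Set.len]
  have h2 := pv_rows_black_empty board (PySem.Set.empty, PySem.Set.empty)
  have h1 := pv_rows_white_empty board (PySem.Set.empty, PySem.Set.empty)
  simp only [PySem.Set.empty, true_and] at h2 h1
  cases hW : board.any (fun row => row.toList.any (fun c => c ∈ (['w', 'W', '@'] : List Char))) <;>
  cases hB : board.any (fun row => row.toList.any (fun c => c ∈ (['b', 'B', '$'] : List Char))) <;>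
  simp only [List.any_eq_false, List.any_eq_true] at hW hB
  · -- no white, no black anywhere
    simp only [PySem.Set.empty, Int.natCast_eq_zero, List.length_eq_zero_iff, h2, h1]
    rw [if_pos (Or.inl (show ∀ r ∈ board, ∀ c ∈ r.toList, c ∉ (['b', 'B', '$'] : List Char) from by
      simpa using hB))]
    decide
  · -- black exists, no white
    simp only [PySem.Set.empty, Int.natCast_eq_zero, List.length_eq_zero_iff, h2, h1]
    rw [if_pos (Or.inr (show ∀ r ∈ board, ∀ c ∈ r.toList, c ∉ (['w', 'W', '@'] : List Char) from by
      simpa using hW))]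
    decide
  · -- white exists, no black
    simp only [PySem.Set.empty, Int.natCast_eq_zero, List.length_eq_zero_iff, h2, h1]
    rw [if_pos (Or.inl (show ∀ r ∈ board, ∀ c ∈ r.toList, c ∉ (['b', 'B', '$'] : List Char) from by
      simpa using hB))]
    decide
  · -- both colours present: neither set is empty
    simp only [PySem.Set.empty, Int.natCast_eq_zero, List.length_eq_zero_iff, h2, h1]
    rw [if_neg]
    · decide
    · rintro (h | h)
      · obtain ⟨r, hr, c, hc, hcm⟩ := hB
        exact (h r hr c hc) (by simpa using hcm)
      · obtain ⟨r, hr, c, hc, hcm⟩ := hW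
        exact (h r hr c hc) (by simpa using hcm)
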